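-- pv_equiv track=rewrite | github.com/hyungtae48kim/6-strike-bomb | utils/analysis.py | decade_distribution
-- ===== SOURCE A (Python) =====
-- from typing import List, Dict, Tuple
--
-- def decade_distribution(combo: List[int]) -> Dict[str, int]:
--     """번호대 분포 (1-9, 10-19, 20-29, 30-39, 40-45)"""
--     ranges = {"1-9": 0, "10-19": 0, "20-29": 0, "30-39": 0, "40-45": 0}
--     for n in combo:
--         if n <= 9:
--             ranges["1-9"] += 1
--         elif n <= 19:
--             ranges["10-19"] += 1
--         elif n <= 29:
--             ranges["20-29"] += 1
--         elif n <= 39: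
--             ranges["30-39"] += 1
--         else:
--             ranges["40-45"] += 1
--     return ranges
-- ===== SOURCE B (Python) =====
-- def decade_distribution(combo):
--     """번호대 분포 (1-9, 10-19, 20-29, 30-39, 40-45)"""
--     # staged passes: cumulative threshold counts, then adjacent differences
--     cum = [sum(1 for n in combo if n <= b) for b in (9, 19, 29, 39)] + [len(combo)]
--     keys = ["1-9", "10-19", "20-29", "30-39", "40-45"]
--     return {k: c - p for k, c, p in zip(keys, cum, [0] + cum[:-1])}
-- ===== Notes on version B (the rewrite author's own statement) =====
-- stated objective: alternative
-- what changed: Instead of a single pass bucketing each element with an if/elif chain into a dict, B makes one counting pass per threshold to get cumulative counts (<=9, <=19, <=29, <=39, total) and derives each bucket as the difference of adjacent cumulative counts.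
import Mathlib
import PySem

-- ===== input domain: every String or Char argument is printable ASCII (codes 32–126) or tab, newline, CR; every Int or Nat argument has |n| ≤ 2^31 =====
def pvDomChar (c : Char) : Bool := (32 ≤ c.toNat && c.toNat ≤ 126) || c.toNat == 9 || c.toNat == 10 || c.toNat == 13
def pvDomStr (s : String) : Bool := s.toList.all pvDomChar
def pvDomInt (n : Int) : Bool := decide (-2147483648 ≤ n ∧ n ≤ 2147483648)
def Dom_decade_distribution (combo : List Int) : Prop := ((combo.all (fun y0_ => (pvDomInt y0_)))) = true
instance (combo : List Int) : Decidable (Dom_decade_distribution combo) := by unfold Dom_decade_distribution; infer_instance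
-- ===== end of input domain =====

-- B replaces A's single bucketing pass (if/elif chain into a dict) by five cumulative
-- threshold-counting passes whose adjacent differences give the buckets (alternative; same cost).

-- ===== PORT A =====
-- for n in combo: if/elif chain incrementing one of five fixed dict keys
def decade_distribution (combo : List Int) : List (String × Int) :=
  (combo.foldl
    (fun d n =>
      if n ≤ 9 then d.insert "1-9" (d.getD "1-9" 0 + 1)
      else if n ≤ 19 then d.insert "10-19" (d.getD "10-19" 0 + 1)
      else if n ≤ 29 then d.insert "20-29" (d.getD "20-29" 0 + 1)
      else if n ≤ 39 then d.insert "30-39" (d.getD "30-39" 0 + 1)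
      else d.insert "40-45" (d.getD "40-45" 0 + 1))
    (PySem.Dict.mk [("1-9", 0), ("10-19", 0), ("20-29", 0), ("30-39", 0), ("40-45", 0)])).items

-- ===== PORT B =====
-- cum = [sum(1 for n in combo if n <= b) for b in (9,19,29,39)] + [len(combo)]
-- return {k: c - p for k, c, p in zip(keys, cum, [0] + cum[:-1])}
def decade_distribution_alt (combo : List Int) : List (String × Int) :=
  let cum : List Int :=
    ([9, 19, 29, 39] : List Int).map
      (fun b => ((combo.filter (fun n => n ≤ b)).length : Int)) ++ [(combo.length : Int)]
  let keys : List String := ["1-9", "10-19", "20-29", "30-39", "40-45"]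
  (keys.zip (cum.zip ((0 : Int) :: cum.dropLast))).map (fun p => (p.1, p.2.1 - p.2.2))

-- ===== PRECONDITION & SPEC =====
def Spec_decade_distribution (combo : List Int) (out : List (String × Int)) : Prop := out = decade_distribution_alt combo
instance (combo : List Int) (out : List (String × Int)) : Decidable (Spec_decade_distribution combo out) := by unfold Spec_decade_distribution; infer_instance

-- ===== CLAIM (what is proved, stated in full; the proofs are below) =====
def Claim_equal_decade_distribution : Prop := ∀ (combo : List Int), Dom_decade_distribution combo → Spec_decade_distribution combo (decade_distribution combo)

-- ===== LEMMAS AND PROOFS =====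

-- loop invariant for A: the dict carries the five cumulative-difference counts
lemma decade_loop (l : List Int) (a b c d e : Int) :
    (l.foldl
      (fun d n =>
        if n ≤ 9 then d.insert "1-9" (d.getD "1-9" 0 + 1)
        else if n ≤ 19 then d.insert "10-19" (d.getD "10-19" 0 + 1)
        else if n ≤ 29 then d.insert "20-29" (d.getD "20-29" 0 + 1)
        else if n ≤ 39 then d.insert "30-39" (d.getD "30-39" 0 + 1)
        else d.insert "40-45" (d.getD "40-45" 0 + 1))
      (PySem.Dict.mk [("1-9", a), ("10-19", b), ("20-29", c), ("30-39", d), ("40-45", e)])).items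
    =
    [("1-9", a + ((l.filter (fun n => n ≤ 9)).length : Int)),
     ("10-19", b + (((l.filter (fun n => n ≤ 19)).length : Int) - ((l.filter (fun n => n ≤ 9)).length : Int))),
     ("20-29", c + (((l.filter (fun n => n ≤ 29)).length : Int) - ((l.filter (fun n => n ≤ 19)).length : Int))),
     ("30-39", d + (((l.filter (fun n => n ≤ 39)).length : Int) - ((l.filter (fun n => n ≤ 29)).length : Int))),
     ("40-45", e + ((l.length : Int) - ((l.filter (fun n => n ≤ 39)).length : Int)))] := by
  induction l generalizing a b c d e with
  | nil => simp
  | cons n t ih =>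
    simp only [List.foldl_cons, List.filter_cons, List.length_cons]
    by_cases h1 : n ≤ 9
    · rw [show (PySem.Dict.mk [("1-9", a), ("10-19", b), ("20-29", c), ("30-39", d),
          ("40-45", e)]).insert "1-9" ((PySem.Dict.mk [("1-9", a), ("10-19", b), ("20-29", c),
          ("30-39", d), ("40-45", e)]).getD "1-9" 0 + 1) = PySem.Dict.mk [("1-9", a + 1),
          ("10-19", b), ("20-29", c), ("30-39", d), ("40-45", e)] from by
        simp [PySem.Dict.insert, PySem.Dict.getD, PySem.Dict.get?, PySem.Dict.contains]]
      have h2 : n ≤ 19 := by omega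
      have h3 : n ≤ 29 := by omega
      have h4 : n ≤ 39 := by omega
      simp only [h1, h2, h3, h4, if_true, decide_true, List.length_cons]
      rw [ih]
      simp only [List.cons.injEq, Prod.mk.injEq]
      push_cast
      and_intros <;> first | rfl | ring | trivial
    · by_cases h2 : n ≤ 19
      · simp only [h1, if_false]
        rw [show (PySem.Dict.mk [("1-9", a), ("10-19", b), ("20-29", c), ("30-39", d),
            ("40-45", e)]).insert "10-19" ((PySem.Dict.mk [("1-9", a), ("10-19", b), ("20-29", c),
            ("30-39", d), ("40-45", e)]).getD "10-19" 0 + 1) = PySem.Dict.mk [("1-9", a),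
            ("10-19", b + 1), ("20-29", c), ("30-39", d), ("40-45", e)] from by
          simp [PySem.Dict.insert, PySem.Dict.getD, PySem.Dict.get?, PySem.Dict.contains]]
        have h3 : n ≤ 29 := by omega
        have h4 : n ≤ 39 := by omega
        simp only [h1, h2, h3, h4, if_true, decide_true, decide_false, List.length_cons]
        rw [ih]
        simp only [List.cons.injEq, Prod.mk.injEq]
        push_cast
        and_intros <;> first | rfl | ring | trivial
      · by_cases h3 : n ≤ 29
        · simp only [h1, h2, if_false]
          rw [show (PySem.Dict.mk [("1-9", a), ("10-19", b), ("20-29", c), ("30-39", d),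
              ("40-45", e)]).insert "20-29" ((PySem.Dict.mk [("1-9", a), ("10-19", b), ("20-29", c),
              ("30-39", d), ("40-45", e)]).getD "20-29" 0 + 1) = PySem.Dict.mk [("1-9", a),
              ("10-19", b), ("20-29", c + 1), ("30-39", d), ("40-45", e)] from by
            simp [PySem.Dict.insert, PySem.Dict.getD, PySem.Dict.get?, PySem.Dict.contains]]
          have h4 : n ≤ 39 := by omega
          simp only [h1, h2, h3, h4, if_true, decide_true, decide_false, List.length_cons]
          rw [ih]
          simp only [List.cons.injEq, Prod.mk.injEq]
          push_cast
          and_intros <;> first | rfl | ring | trivial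
        · by_cases h4 : n ≤ 39
          · simp only [h1, h2, h3, if_false]
            rw [show (PySem.Dict.mk [("1-9", a), ("10-19", b), ("20-29", c), ("30-39", d),
                ("40-45", e)]).insert "30-39" ((PySem.Dict.mk [("1-9", a), ("10-19", b),
                ("20-29", c), ("30-39", d), ("40-45", e)]).getD "30-39" 0 + 1) = PySem.Dict.mk
                [("1-9", a), ("10-19", b), ("20-29", c), ("30-39", d + 1), ("40-45", e)] from by
              simp [PySem.Dict.insert, PySem.Dict.getD, PySem.Dict.get?, PySem.Dict.contains]]
            simp only [h1, h2, h3, h4, if_true, decide_true, decide_false, List.length_cons]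
            rw [ih]
            simp only [List.cons.injEq, Prod.mk.injEq]
            push_cast
            and_intros <;> first | rfl | ring | trivial
          · simp only [h1, h2, h3, h4, if_false]
            rw [show (PySem.Dict.mk [("1-9", a), ("10-19", b), ("20-29", c), ("30-39", d),
                ("40-45", e)]).insert "40-45" ((PySem.Dict.mk [("1-9", a), ("10-19", b),
                ("20-29", c), ("30-39", d), ("40-45", e)]).getD "40-45" 0 + 1) = PySem.Dict.mk
                [("1-9", a), ("10-19", b), ("20-29", c), ("30-39", d), ("40-45", e + 1)] from by
              simp [PySem.Dict.insert, PySem.Dict.getD, PySem.Dict.get?, PySem.Dict.contains]]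
            simp only [h1, h2, h3, h4, decide_false, if_false, List.length_cons]
            rw [ih]
            simp only [List.cons.injEq, Prod.mk.injEq]
            push_cast
            and_intros <;> first | rfl | ring | trivial

-- ===== VERDICT (by name: the statement is the Claim_ definition above) =====
theorem decade_distribution_spec : Claim_equal_decade_distribution := by
  intro combo _
  unfold Spec_decade_distribution decade_distribution decade_distribution_alt
  rw [decade_loop combo 0 0 0 0 0]
  simp [List.zip, List.zipWith]
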